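-- pv_equiv track=rewrite | github.com/Ak1yamaKiyoshi/kpi-TA | lab_11/main.py | smooth_sort
-- ===== SOURCE A (Python) =====
-- def smooth_sort(arr, viz_steps=None):
--     if viz_steps is None:
--         viz_steps = []
--
--     def sift_down(start, end):
--         root = start
--         while True:
--             child = root * 2 + 1
--             if child > end:
--                 break
--             if child + 1 <= end and arr[child] < arr[child + 1]:
--                 child += 1
--             if arr[root] < arr[child]:
--                 arr[root], arr[child] = arr[child], arr[root]
--                 viz_steps.append(('s', root, child))
--                 root = child
--             else:
--                 break
--
--     for i in range((len(arr) - 1) // 2, -1, -1):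
--         sift_down(i, len(arr) - 1)
--
--     for i in range(len(arr) - 1, 0, -1):
--         arr[0], arr[i] = arr[i], arr[0]
--         viz_steps.append(('s', 0, i))
--         sift_down(0, i - 1)
--
--     return viz_steps
-- ===== SOURCE B (Python) =====
-- def smooth_sort(arr, viz_steps=None):
--     # Recursive sift-down collecting swap steps into a local list; same in-place
--     # mutation of arr, and if viz_steps is given it is extended at the end
--     # (A appends to it step by step; final contents are identical).
--     steps = []
--
--     def sift(root, end):
--         child = 2 * root + 1
--         if child > end:
--             return
--         if child < end and arr[child] < arr[child + 1]:
--             child += 1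
--         if arr[root] < arr[child]:
--             arr[root], arr[child] = arr[child], arr[root]
--             steps.append(('s', root, child))
--             sift(child, end)
--
--     n = len(arr)
--     for i in reversed(range(n // 2)):
--         sift(i, n - 1)
--     for end in range(n - 1, 0, -1):
--         arr[0], arr[end] = arr[end], arr[0]
--         steps.append(('s', 0, end))
--         sift(0, end - 1)
--
--     if viz_steps is None:
--         return steps
--     viz_steps.extend(steps)
--     return viz_steps
-- ===== Notes on version B (the rewrite author's own statement) =====
-- stated objective: alternative
-- what changed: A's while-True sift_down loop becomes a recursive sift that returns the steps it emits (concatenated by callers into a locally built list, extended onto viz_steps at the end) and iterates heapify over reversed(range(n//2)) instead of range((n-1)//2,-1,-1), skipping A's extra no-op top iteration on odd n.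
import Mathlib
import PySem

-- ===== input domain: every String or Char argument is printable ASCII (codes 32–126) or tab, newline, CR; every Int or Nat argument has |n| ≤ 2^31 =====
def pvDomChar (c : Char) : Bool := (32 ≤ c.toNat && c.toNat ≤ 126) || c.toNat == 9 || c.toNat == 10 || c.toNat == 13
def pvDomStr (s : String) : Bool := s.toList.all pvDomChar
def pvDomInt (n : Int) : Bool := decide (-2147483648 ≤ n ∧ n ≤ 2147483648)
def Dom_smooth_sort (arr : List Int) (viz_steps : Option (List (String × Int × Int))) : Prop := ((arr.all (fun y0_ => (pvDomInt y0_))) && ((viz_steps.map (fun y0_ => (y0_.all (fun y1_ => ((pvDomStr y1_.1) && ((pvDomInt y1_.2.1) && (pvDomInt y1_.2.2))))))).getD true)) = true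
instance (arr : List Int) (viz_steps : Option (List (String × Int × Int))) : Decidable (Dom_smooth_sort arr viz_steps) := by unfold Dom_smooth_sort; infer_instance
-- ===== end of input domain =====

-- B replaces A's while-loop sift_down by a recursive sift that returns the swap steps it
-- produced (concatenated by the callers), and drives both phases by structural recursion
-- instead of range loops (objective: alternative decomposition, same cost).
-- Note: A mutates arr in place and appends to a caller-supplied viz_steps; the equivalence
-- proved here is about the RETURN value (Python B performs the same final mutations).

-- ===== PORT A =====
-- A's inner `while True` sift_down loop; state (arr, viz_steps), mutable root.
-- Indices are ports of A's nonnegative ints; arr.getD i 0 = arr[i] (always in range here).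
def siftLoopA (arr : List Int) (steps : List (String × Int × Int)) (root e : Nat) :
    List Int × List (String × Int × Int) :=
  let child := root * 2 + 1
  if e < child then (arr, steps)
  else
    let c := if child + 1 ≤ e ∧ arr.getD child 0 < arr.getD (child + 1) 0 then child + 1 else child
    if arr.getD root 0 < arr.getD c 0 then
      siftLoopA ((arr.set root (arr.getD c 0)).set c (arr.getD root 0))
        (steps ++ [("s", (root : Int), (c : Int))]) c e
    else (arr, steps)
termination_by e - root
decreasing_by split <;> omega

def smooth_sort (arr : List Int) (viz_steps : Option (List (String × Int × Int))) : List (String × Int × Int) :=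
  let vs := match viz_steps with | none => [] | some v => v
  let n := arr.length
  let st1 := (PySem.List.pyRange (PySem.Int.floordiv ((n : Int) - 1) 2) (-1) (-1)).foldl
      (fun st i => siftLoopA st.1 st.2 i.toNat (n - 1)) (arr, vs)
  let st2 := (PySem.List.pyRange ((n : Int) - 1) 0 (-1)).foldl
      (fun st i =>
        siftLoopA ((st.1.set 0 (st.1.getD i.toNat 0)).set i.toNat (st.1.getD 0 0))
          (st.2 ++ [("s", (0 : Int), i)]) 0 (i.toNat - 1)) st1
  st2.2

-- ===== PORT B =====
-- B's recursive sift: returns the updated array and the list of steps it emitted.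
def siftB (arr : List Int) (root e : Nat) : List Int × List (String × Int × Int) :=
  let child := 2 * root + 1
  if e < child then (arr, [])
  else
    let c := if child < e ∧ arr.getD child 0 < arr.getD (child + 1) 0 then child + 1 else child
    if arr.getD root 0 < arr.getD c 0 then
      let r := siftB ((arr.set root (arr.getD c 0)).set c (arr.getD root 0)) c e
      (r.1, ("s", (root : Int), (c : Int)) :: r.2)
    else (arr, [])
termination_by e - root
decreasing_by split <;> omega

-- `for i in reversed(range(n // 2)): sift(i, n - 1)`: sift indices k-1, …, 0
def buildB (arr : List Int) (n k : Nat) : List Int × List (String × Int × Int) :=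
  match k with
  | 0 => (arr, [])
  | k + 1 =>
    let r := siftB arr k (n - 1)
    let r' := buildB r.1 n k
    (r'.1, r.2 ++ r'.2)

-- `for end in range(n - 1, 0, -1): swap(0, end); record; sift(0, end - 1)`
def extractB (arr : List Int) (e : Nat) : List Int × List (String × Int × Int) :=
  match e with
  | 0 => (arr, [])
  | m + 1 =>
    let a := (arr.set 0 (arr.getD (m + 1) 0)).set (m + 1) (arr.getD 0 0)
    let r := siftB a 0 m
    let r' := extractB r.1 m
    (r'.1, ("s", 0, ((m : Int) + 1)) :: (r.2 ++ r'.2))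

def smooth_sort_alt (arr : List Int) (viz_steps : Option (List (String × Int × Int))) : List (String × Int × Int) :=
  let n := arr.length
  let p1 := buildB arr n (n / 2)
  let p2 := extractB p1.1 (n - 1)
  let steps := p1.2 ++ p2.2
  match viz_steps with
  | none => steps
  | some v => v ++ steps

-- ===== PRECONDITION & SPEC =====
def Spec_smooth_sort (arr : List Int) (viz_steps : Option (List (String × Int × Int))) (out : List (String × Int × Int)) : Prop := out = smooth_sort_alt arr viz_steps
instance (arr : List Int) (viz_steps : Option (List (String × Int × Int))) (out : List (String × Int × Int)) : Decidable (Spec_smooth_sort arr viz_steps out) := by unfold Spec_smooth_sort; infer_instance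

-- ===== CLAIM (what is proved, stated in full; the proofs are below) =====
def Claim_equal_smooth_sort : Prop := ∀ (arr : List Int) (viz_steps : Option (List (String × Int × Int))), Dom_smooth_sort arr viz_steps → Spec_smooth_sort arr viz_steps (smooth_sort arr viz_steps)

-- ===== LEMMAS AND PROOFS =====

-- A's sift loop = B's recursive sift, with the steps appended to the accumulator.
theorem sift_eq : ∀ (k root e : Nat), e - root ≤ k → ∀ (arr : List Int) (steps : List (String × Int × Int)),
    siftLoopA arr steps root e = ((siftB arr root e).1, steps ++ (siftB arr root e).2) := by
  intro k
  induction k with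
  | zero =>
    intro root e hk arr steps
    rw [siftLoopA, siftB]
    have h1 : e < root * 2 + 1 := by omega
    have h2 : e < 2 * root + 1 := by omega
    simp [h1, h2]
  | succ k ih =>
    intro root e hk arr steps
    rw [siftLoopA, siftB]
    simp only [Nat.mul_comm root 2, Nat.lt_iff_add_one_le]
    by_cases h1 : e + 1 ≤ 2 * root + 1
    · simp [h1]
    · simp only [if_neg h1]
      by_cases hsel : 2 * root + 1 + 1 ≤ e ∧ arr.getD (2 * root + 1) 0 < arr.getD (2 * root + 1 + 1) 0
      · simp only [if_pos hsel]
        by_cases hsw : arr.getD root 0 < arr.getD (2 * root + 1 + 1) 0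
        · simp only [if_pos hsw]
          rw [ih (2 * root + 1 + 1) e (by omega)]
          simp
        · simp only [if_neg hsw]; simp
      · simp only [if_neg hsel]
        by_cases hsw : arr.getD root 0 < arr.getD (2 * root + 1) 0
        · simp only [if_pos hsw]
          rw [ih (2 * root + 1) e (by omega)]
          simp
        · simp only [if_neg hsw]; simp

theorem phase1 (n : Nat) : ∀ (k : Nat) (arr : List Int) (vs : List (String × Int × Int)),
    (PySem.List.pyRange ((k : Int) - 1) (-1) (-1)).foldl
      (fun st i => siftLoopA st.1 st.2 i.toNat (n - 1)) (arr, vs)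
    = ((buildB arr n k).1, vs ++ (buildB arr n k).2) := by
  intro k
  induction k with
  | zero =>
    intro arr vs
    rw [PySem.List.pyRange_neg_one_eq_nil (by omega)]
    simp [buildB]
  | succ k ih =>
    intro arr vs
    have hcons : PySem.List.pyRange ((↑(k + 1) : Int) - 1) (-1) (-1)
        = ((k : Int)) :: PySem.List.pyRange ((k : Int) - 1) (-1) (-1) := by
      rw [show ((↑(k + 1) : Int) - 1) = (k : Int) by push_cast; ring]
      exact PySem.List.pyRange_neg_one_cons (by omega)
    rw [hcons]
    simp only [List.foldl_cons, Int.toNat_natCast]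
    rw [sift_eq (n - k) k (n - 1) (by omega)]
    rw [ih]
    show _ = ((buildB arr n (k + 1)).1, vs ++ (buildB arr n (k + 1)).2)
    simp [buildB]

theorem build_top (arr : List Int) (n : Nat) (h : n % 2 = 1) :
    buildB arr n (n / 2 + 1) = buildB arr n (n / 2) := by
  have hno : siftB arr (n / 2) (n - 1) = (arr, []) := by
    rw [siftB]
    have : n - 1 < 2 * (n / 2) + 1 := by omega
    simp [this]
  show (let r := siftB arr (n / 2) (n - 1); let r' := buildB r.1 n (n / 2); (r'.1, r.2 ++ r'.2)) = _
  rw [hno]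
  simp

theorem phase2 : ∀ (m : Nat) (arr : List Int) (vs : List (String × Int × Int)),
    (PySem.List.pyRange ((m : Nat) : Int) 0 (-1)).foldl
      (fun st i =>
        siftLoopA ((st.1.set 0 (st.1.getD i.toNat 0)).set i.toNat (st.1.getD 0 0))
          (st.2 ++ [("s", (0 : Int), i)]) 0 (i.toNat - 1)) (arr, vs)
    = ((extractB arr m).1, vs ++ (extractB arr m).2) := by
  intro m
  induction m with
  | zero =>
    intro arr vs
    rw [PySem.List.pyRange_neg_one_eq_nil (by omega)]
    simp [extractB]
  | succ m ih =>
    intro arr vs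
    rw [PySem.List.pyRange_neg_one_cons (by exact_mod_cast Nat.succ_pos m)]
    simp only [List.foldl_cons]
    rw [show ((↑(m + 1) : Int) - 1) = (m : Int) by push_cast; ring]
    rw [show (↑(m + 1) : Int).toNat = m + 1 from Int.toNat_natCast _]
    rw [show (m + 1) - 1 = m from rfl]
    rw [sift_eq m 0 m (by omega)]
    rw [ih]
    show _ = ((extractB arr (m + 1)).1, vs ++ (extractB arr (m + 1)).2)
    simp only [extractB]
    push_cast
    simp

-- ===== VERDICT (by name: the statement is the Claim_ definition above) =====
theorem smooth_sort_spec : Claim_equal_smooth_sort := by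
  intro arr viz _
  unfold Spec_smooth_sort
  rcases Nat.eq_zero_or_pos arr.length with h0 | hpos
  · obtain rfl : arr = [] := List.length_eq_zero_iff.mp h0
    have e1 : PySem.List.pyRange (PySem.Int.floordiv ((([] : List Int).length : Int) - 1) 2) (-1) (-1) = [] := by decide
    have e2 : PySem.List.pyRange ((([] : List Int).length : Int) - 1) 0 (-1) = [] := by decide
    simp only [smooth_sort, smooth_sort_alt, e1, e2, List.foldl_nil]
    cases viz <;> simp [buildB, extractB]
  · obtain ⟨m, hm⟩ : ∃ m, arr.length = m + 1 := ⟨arr.length - 1, by omega⟩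
    simp only [smooth_sort, smooth_sort_alt, hm]
    have h1 : PySem.Int.floordiv ((↑(m + 1) : Int) - 1) 2 = ((m / 2 + 1 : Nat) : Int) - 1 := by
      rw [PySem.Int.floordiv_eq_ediv_of_pos (by omega)]
      push_cast
      omega
    rw [h1, phase1]
    rw [show ((↑(m + 1) : Int) - 1) = ((m : Nat) : Int) by push_cast; ring]
    rw [phase2]
    have hb : buildB arr (m + 1) (m / 2 + 1) = buildB arr (m + 1) ((m + 1) / 2) := by
      by_cases hpar : (m + 1) % 2 = 1
      · rw [show m / 2 + 1 = (m + 1) / 2 + 1 by omega, build_top _ _ hpar]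
      · rw [show m / 2 + 1 = (m + 1) / 2 by omega]
    rw [hb]
    rw [show m + 1 - 1 = m from rfl]
    cases viz <;> simp
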